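-- pv_equiv track=rewrite | github.com/saminigod/pywbem | testsuite/test_nocasedict.py | swapcase2
-- ===== SOURCE A (Python) =====
-- def swapcase2(text):
--     """Returns text, where every other character has been changed to swap
--     its lexical case. For strings that contain at least one letter, the
--     returned string is guaranteed to be different from the input string."""
--     text_cs = ''
--     i = 0
--     for c in text:
--         if i % 2 != 0:
--             c = c.swapcase()
--         text_cs += c
--         i += 1
--     return text_cs
-- ===== SOURCE B (Python) =====
-- def swapcase2(text):
--     even = text[::2]
--     odd = text[1::2].swapcase()
--     out = []
--     for i in range(len(even)):
--         out.append(even[i])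
--         if i < len(odd):
--             out.append(odd[i])
--     return ''.join(out)
-- ===== Notes on version B (the rewrite author's own statement) =====
-- stated objective: faster
-- what changed: B splits the string into the two parity slices, bulk-swapcases the odd slice once, and re-interleaves them, replacing A's per-character indexed loop with repeated string concatenation.
import Mathlib
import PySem

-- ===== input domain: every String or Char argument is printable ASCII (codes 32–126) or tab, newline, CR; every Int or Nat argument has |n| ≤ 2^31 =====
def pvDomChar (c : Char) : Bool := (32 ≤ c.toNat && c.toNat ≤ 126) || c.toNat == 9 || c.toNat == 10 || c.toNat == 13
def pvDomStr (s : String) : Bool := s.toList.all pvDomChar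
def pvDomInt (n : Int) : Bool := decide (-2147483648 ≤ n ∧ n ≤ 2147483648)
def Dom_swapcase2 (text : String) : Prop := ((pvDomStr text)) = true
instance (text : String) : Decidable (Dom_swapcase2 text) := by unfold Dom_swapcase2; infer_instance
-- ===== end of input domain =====

-- B re-implements A by parity slices + bulk swapcase + re-interleave (alternative decomposition); return values proved equal.

-- per-character swapcase, exact on the ASCII domain (Python c.swapcase() for ASCII c)
def pySwapChar (c : Char) : Char :=
  if PySem.Chars.islower c then PySem.Chars.upperChar c
  else if PySem.Chars.isupper c then PySem.Chars.lowerChar c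
  else c

-- ===== PORT A =====
-- A's loop over characters with the running index i; 'text_cs += c' builds the output forward
def swapcase2Go (l : List Char) (i : Int) : List Char :=
  match l with
  | [] => []
  | c :: rest =>
    (if i % 2 != 0 then pySwapChar c else c) :: swapcase2Go rest (i + 1)

def swapcase2 (text : String) : String := String.mk (swapcase2Go text.toList 0)

-- ===== PORT B =====
-- hand port of the stride-2 slices text[::2] and text[1::2] (exact: every second code point)
def takeEvery2 : List Char → List Char
  | [] => []
  | [c] => [c]
  | c :: _ :: rest => c :: takeEvery2 rest

-- the merge pass: for i in range(len(even)): append even[i]; if i < len(odd): append odd[i]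
def reinterleave : List Char → List Char → List Char
  | [], _ => []
  | e :: es, [] => e :: reinterleave es []
  | e :: es, o :: os => e :: o :: reinterleave es os

def swapcase2_alt (text : String) : String :=
  let even := takeEvery2 text.toList
  let odd := (takeEvery2 (text.toList.drop 1)).map pySwapChar
  String.mk (reinterleave even odd)

-- ===== PRECONDITION & SPEC =====
def Spec_swapcase2 (text : String) (out : String) : Prop := out = swapcase2_alt text
instance (text : String) (out : String) : Decidable (Spec_swapcase2 text out) := by unfold Spec_swapcase2; infer_instance

-- ===== CLAIM (what is proved, stated in full; the proofs are below) =====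
def Claim_equal_swapcase2 : Prop := ∀ (text : String), Dom_swapcase2 text → Spec_swapcase2 text (swapcase2 text)

-- ===== LEMMAS AND PROOFS =====
theorem swapcase2Go_eq : ∀ (l : List Char) (i : Int), i % 2 = 0 →
    swapcase2Go l i = reinterleave (takeEvery2 l) ((takeEvery2 (l.drop 1)).map pySwapChar)
  | [], _, _ => rfl
  | [c], i, h => by
    have h0 : ¬ (i % 2 != 0) = true := by simp; omega
    simp [swapcase2Go, takeEvery2, reinterleave, h0]
  | c :: d :: rest, i, h => by
    have h1 : ((i + 1) % 2 != 0) = true := by simp; omega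
    have h0 : ¬ (i % 2 != 0) = true := by simp; omega
    have ih := swapcase2Go_eq rest (i + 2) (by omega)
    show (if i % 2 != 0 then pySwapChar c else c) ::
        (if (i + 1) % 2 != 0 then pySwapChar d else d) :: swapcase2Go rest (i + 1 + 1) = _
    rw [if_neg h0, if_pos h1, show i + 1 + 1 = i + 2 by ring, ih]
    cases rest <;> rfl

-- ===== VERDICT (by name: the statement is the Claim_ definition above) =====
theorem swapcase2_spec : Claim_equal_swapcase2 := by
  intro text _
  unfold Spec_swapcase2 swapcase2 swapcase2_alt
  rw [swapcase2Go_eq text.toList 0 (by decide)]
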